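-- pv_equiv track=rewrite | github.com/rwu8/CMU-python | week4/wk4_practice.py | moveToBack
-- ===== SOURCE A (Python) =====
-- def moveToBack(a, b):
--     for num in b:
--         if num in a:
--             count = a.count(num)
--             for i in range(count):
--                 idx = a.index(num)
--                 del a[idx]
--                 a.append(num)
--     return a
-- ===== SOURCE B (Python) =====
-- def moveToBack(a, b):
--     # One pass over each list: count a's values, order the moved values by their
--     # last occurrence in b, then rebuild the answer (does not mutate a in place;
--     # the equivalence claimed is about the return value only).
--     cnt = {}
--     for x in a:
--         cnt[x] = cnt.get(x, 0) + 1
--     move = []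
--     for v in b:
--         if v in cnt:
--             if v in move:
--                 move.remove(v)
--             move.append(v)
--     front = [x for x in a if x not in move]
--     back = []
--     for v in move:
--         back += [v] * cnt[v]
--     return front + back
-- ===== Notes on version B (the rewrite author's own statement) =====
-- stated objective: faster
-- what changed: Instead of repeatedly scanning and splicing the list (count/index/del per occurrence, per element of b), B builds a count dictionary of a and the last-occurrence order of b's values in one pass each, then rebuilds the result as kept-elements followed by replicated groups; A mutates a in place, B only returns the value (return values are equal).
import Mathlib
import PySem

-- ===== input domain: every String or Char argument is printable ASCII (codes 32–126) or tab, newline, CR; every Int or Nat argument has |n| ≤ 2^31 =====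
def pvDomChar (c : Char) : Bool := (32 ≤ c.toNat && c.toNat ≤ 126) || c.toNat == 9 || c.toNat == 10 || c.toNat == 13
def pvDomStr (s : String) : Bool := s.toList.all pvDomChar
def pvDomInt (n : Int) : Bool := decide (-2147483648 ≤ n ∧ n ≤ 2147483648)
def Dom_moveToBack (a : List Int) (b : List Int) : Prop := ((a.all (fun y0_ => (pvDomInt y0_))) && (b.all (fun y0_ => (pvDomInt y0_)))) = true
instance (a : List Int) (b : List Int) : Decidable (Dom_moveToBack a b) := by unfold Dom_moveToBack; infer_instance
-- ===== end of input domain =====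

-- B replaces A's repeated count/index/del scans by one counting pass plus a rebuild
-- (faster); A mutates its argument in place, B does not — the equivalence proved is
-- about the return value.


-- ===== PORT A =====
def moveToBack (a : List Int) (b : List Int) : List Int :=
  b.foldl (fun acc num =>
    if acc.contains num then
      let count := PySem.List.count acc num
      (PySem.List.pyRange 0 (count : Int) 1).foldl (fun s _ =>
        match PySem.List.index? s num with
        | some idx => s.eraseIdx idx ++ [num]   -- del a[idx]; a.append(num)
        | none => s                              -- unreachable: num is in s here
        ) acc
    else acc) a

-- ===== PORT B =====
def moveToBack_alt (a : List Int) (b : List Int) : List Int :=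
  let cnt := a.foldl (fun d x => d.insert x (d.getD x 0 + 1)) (PySem.Dict.empty : PySem.Dict Int Int)
  let move := b.foldl (fun m v =>
    if cnt.contains v then
      (if m.contains v then (PySem.List.remove? m v).getD m else m) ++ [v]
    else m) ([] : List Int)
  let front := a.filter (fun x => !(move.contains x))
  -- cnt[v]: key v is always present here (v was found in cnt when put into move)
  let back := move.foldl (fun acc v => acc ++ List.replicate (cnt.getD v 0).toNat v) ([] : List Int)
  front ++ back

-- ===== PRECONDITION & SPEC =====
def Spec_moveToBack (a : List Int) (b : List Int) (out : List Int) : Prop := out = moveToBack_alt a b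
instance (a : List Int) (b : List Int) (out : List Int) : Decidable (Spec_moveToBack a b out) := by unfold Spec_moveToBack; infer_instance

-- ===== CLAIM (what is proved, stated in full; the proofs are below) =====
def Claim_equal_moveToBack : Prop := ∀ (a : List Int) (b : List Int), Dom_moveToBack a b → Spec_moveToBack a b (moveToBack a b)

-- ===== LEMMAS AND PROOFS =====

-- canonical "move list": distinct moved values ordered by last occurrence in b
def bstep (a : List Int) (m : List Int) (v : Int) : List Int :=
  if a.count v = 0 then m else m.filter (fun x => x != v) ++ [v]

-- canonical result shape: untouched elements of a, then the moved groups
def FB (a m : List Int) : List Int :=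
  a.filter (fun x => !(m.contains x)) ++ m.flatMap (fun v => List.replicate (a.count v) v)

-- j-fold "erase the first occurrence"
def eraseN (num : Int) (j : Nat) (s : List Int) : List Int := (fun t => t.erase num)^[j] s

-- A's inner-loop body
def stepInner (num : Int) (s : List Int) : List Int :=
  match PySem.List.index? s num with
  | some idx => s.eraseIdx idx ++ [num]
  | none => s

lemma foldl_ignore {α β : Type} (g : α → α) (s : α) (l : List β) :
    l.foldl (fun t _ => g t) s = g^[l.length] s := by
  induction l generalizing s with
  | nil => rfl
  | cons x xs ih => simp [List.foldl_cons, ih, Function.iterate_succ_apply]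

lemma stepInner_of_mem (num : Int) (s : List Int) (h : num ∈ s) :
    stepInner num s = s.erase num ++ [num] := by
  unfold stepInner
  rw [PySem.List.index?_eq_idxOf?]
  cases hi : List.idxOf? num s with
  | none => exact absurd (List.idxOf?_eq_none_iff.1 hi) (not_not_intro h)
  | some i => rw [List.erase_eq_eraseIdx]; simp [hi]

lemma eraseN_append_num (num : Int) (j : Nat) (X : List Int) (h : j ≤ X.count num) :
    eraseN num j (X ++ [num]) = eraseN num j X ++ [num] := by
  induction j generalizing X with
  | zero => simp [eraseN]
  | succ j ih =>
    have hmem : num ∈ X := List.count_pos_iff.1 (by omega)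
    rw [eraseN, Function.iterate_succ_apply, List.erase_append_left _ hmem]
    rw [show (fun t => List.erase t num)^[j] (X.erase num ++ [num]) = eraseN num j (X.erase num ++ [num]) from rfl]
    rw [ih (X.erase num) (by rw [List.count_erase_self]; omega)]
    rw [eraseN, eraseN, Function.iterate_succ_apply]

lemma iter_move (num : Int) (j : Nat) (s : List Int) (h : j ≤ s.count num) :
    (stepInner num)^[j] s = eraseN num j s ++ List.replicate j num := by
  induction j generalizing s with
  | zero => simp [eraseN]
  | succ j ih =>
    have hmem : num ∈ s := List.count_pos_iff.1 (by omega)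
    rw [Function.iterate_succ_apply, stepInner_of_mem num s hmem]
    have hc : (s.erase num ++ [num]).count num = s.count num := by
      rw [List.count_append, List.count_erase_self]
      simp; omega
    rw [ih _ (by omega)]
    rw [eraseN_append_num num j (s.erase num) (by rw [List.count_erase_self]; omega)]
    rw [show eraseN num j (s.erase num) = eraseN num (j + 1) s from
      (by rw [eraseN, eraseN, Function.iterate_succ_apply])]
    simp [List.replicate_succ]

lemma filter_ne_erase (num : Int) (l : List Int) :
    (l.erase num).filter (fun x => x != num) = l.filter (fun x => x != num) := by
  induction l with
  | nil => rfl
  | cons x xs ih =>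
    by_cases h : x = num
    · subst h; simp [List.erase_cons_head]
    · rw [List.erase_cons_tail (by simpa using h)]
      simp [h, ih]

lemma filter_ne_of_count_zero (l : List Int) (x : Int) (h : l.count x = 0) :
    l.filter (fun y => y != x) = l := by
  apply List.filter_eq_self.2
  intro y hy
  simp
  rintro rfl
  simp_all [List.count_eq_zero]

lemma eraseN_count_aux (num : Int) (c : Nat) (s : List Int) (h : s.count num = c) :
    eraseN num c s = s.filter (fun x => x != num) := by
  induction c generalizing s with
  | zero => rw [eraseN]; simp [filter_ne_of_count_zero s num h]
  | succ c ih =>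
    rw [eraseN, Function.iterate_succ_apply]
    rw [show (fun t => List.erase t num)^[c] (s.erase num) = eraseN num c (s.erase num) from rfl]
    rw [ih (s.erase num) (by rw [List.count_erase_self]; omega)]
    exact filter_ne_erase num s

lemma eraseN_count_eq_filter (num : Int) (s : List Int) :
    eraseN num (s.count num) s = s.filter (fun x => x != num) :=
  eraseN_count_aux num (s.count num) s rfl

lemma inner_loop_eq (num : Int) (s : List Int) :
    (PySem.List.pyRange 0 ((PySem.List.count s num : Nat) : Int) 1).foldl (fun t _ => stepInner num t) s
      = s.filter (fun x => x != num) ++ List.replicate (s.count num) num := by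
  rw [PySem.List.count_eq, foldl_ignore (stepInner num) s, PySem.List.pyRange_zero_nat]
  rw [List.length_map, List.length_range]
  rw [iter_move num (s.count num) s le_rfl, eraseN_count_eq_filter]

lemma count_flatMap_groups (a m : List Int) (hm : m.Nodup) (x : Int) :
    (m.flatMap (fun v => List.replicate (a.count v) v)).count x
      = if x ∈ m then a.count x else 0 := by
  induction m with
  | nil => simp
  | cons v ms ih =>
    rw [List.nodup_cons] at hm
    rw [List.flatMap_cons, List.count_append, ih hm.2, List.count_replicate]
    by_cases hvx : v = x
    · subst hvx
      simp [hm.1]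
    · simp [hvx, Ne.symm hvx]

lemma count_FB (a m : List Int) (hm : m.Nodup) (x : Int) :
    (FB a m).count x = a.count x := by
  rw [FB, List.count_append, count_flatMap_groups a m hm x]
  by_cases hx : x ∈ m
  · rw [if_pos hx]
    have : x ∉ a.filter (fun y => !(m.contains y)) := by
      intro hmem
      have := (List.mem_filter.1 hmem).2
      simp at this
      exact this hx
    rw [List.count_eq_zero.2 this]
    omega
  · rw [if_neg hx, List.count_filter (by simp [hx])]
    omega

lemma flatMap_filter_groups (a m : List Int) (v : Int) :
    (m.flatMap (fun w => List.replicate (a.count w) w)).filter (fun x => x != v)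
      = (m.filter (fun w => w != v)).flatMap (fun w => List.replicate (a.count w) w) := by
  induction m with
  | nil => rfl
  | cons w ms ih =>
    rw [List.flatMap_cons, List.filter_append, ih, List.filter_cons]
    by_cases hwv : w = v
    · subst hwv
      simp
    · simp [hwv, List.flatMap_cons]

lemma front_filter (a m : List Int) (v : Int) :
    (a.filter (fun x => !(m.contains x))).filter (fun x => x != v)
      = a.filter (fun x => !((m.filter (fun w => w != v) ++ [v]).contains x)) := by
  rw [List.filter_filter]
  apply List.filter_congr
  intro x _
  by_cases hxv : x = v
  · subst hxv; simp
  · by_cases hxm : x ∈ m <;>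
      simp [hxv, hxm, List.mem_filter]

lemma mem_FB_iff (a m : List Int) (hm : m.Nodup) (v : Int) :
    (FB a m).contains v = true ↔ a.count v ≠ 0 := by
  rw [List.contains_iff_mem, ← List.count_pos_iff, count_FB a m hm v]
  omega

lemma stepA_eq (a m : List Int) (hm : m.Nodup) (v : Int) :
    (if (FB a m).contains v then
      (PySem.List.pyRange 0 ((PySem.List.count (FB a m) v : Nat) : Int) 1).foldl
        (fun t _ => stepInner v t) (FB a m)
     else FB a m) = FB a (bstep a m v) := by
  by_cases hv : a.count v = 0
  · rw [if_neg (fun hc => ((mem_FB_iff a m hm v).1 hc) hv), bstep, if_pos hv]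
  · rw [if_pos ((mem_FB_iff a m hm v).2 hv), inner_loop_eq, count_FB a m hm v]
    rw [bstep, if_neg hv, FB, FB, List.filter_append]
    rw [front_filter, flatMap_filter_groups, List.flatMap_append]
    simp [List.append_assoc]

lemma nodup_bstep (a m : List Int) (hm : m.Nodup) (v : Int) : (bstep a m v).Nodup := by
  rw [bstep]
  split
  · exact hm
  · simp [List.nodup_append, hm.filter]

lemma A_fold (a : List Int) (bs : List Int) (m : List Int) (hm : m.Nodup) :
    bs.foldl (fun acc num =>
      if acc.contains num then
        (PySem.List.pyRange 0 ((PySem.List.count acc num : Nat) : Int) 1).foldl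
          (fun s _ => stepInner num s) acc
      else acc) (FB a m)
    = FB a (bs.foldl (bstep a) m) := by
  induction bs generalizing m with
  | nil => rfl
  | cons v bs ih =>
    rw [List.foldl_cons, List.foldl_cons, stepA_eq a m hm v]
    exact ih (bstep a m v) (nodup_bstep a m hm v)

lemma B_move (a : List Int) (bs : List Int) (m : List Int) (hm : m.Nodup) :
    bs.foldl (fun m v =>
      if (PySem.Dict.counter a).contains v then
        (if m.contains v then (PySem.List.remove? m v).getD m else m) ++ [v]
      else m) m
    = bs.foldl (bstep a) m := by
  induction bs generalizing m with
  | nil => rfl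
  | cons v bs ih =>
    rw [List.foldl_cons, List.foldl_cons]
    have hstep : (if (PySem.Dict.counter a).contains v then
        (if m.contains v then (PySem.List.remove? m v).getD m else m) ++ [v]
      else m) = bstep a m v := by
      rw [PySem.Dict.contains_counter]
      by_cases hva : v ∈ a
      · have hcz : ¬ List.count v a = 0 := by rw [List.count_eq_zero]; exact not_not_intro hva
        rw [if_pos (by simpa using hva)]
        by_cases hvm : v ∈ m
        · rw [if_pos (by simpa using hvm), PySem.List.remove?_eq_some_erase m v hvm,
            Option.getD_some, hm.erase_eq_filter, bstep, if_neg hcz]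
        · rw [if_neg (by simpa using hvm), bstep, if_neg hcz,
            filter_ne_of_count_zero m v (List.count_eq_zero.2 hvm)]
      · rw [if_neg (by simpa using hva), bstep, if_pos (List.count_eq_zero.2 hva)]
    rw [hstep]
    exact ih (bstep a m v) (nodup_bstep a m hm v)

lemma FB_nil (a : List Int) : FB a [] = a := by
  simp [FB]

lemma B_eq_FB (a b : List Int) : moveToBack_alt a b = FB a (b.foldl (bstep a) []) := by
  simp only [moveToBack_alt]
  rw [PySem.Dict.foldl_insert_getD_add_one_eq_counter,
      B_move a b [] List.nodup_nil,
      PySem.List.foldl_append_eq_flatMap]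
  rw [FB, List.nil_append]
  congr 1
  apply List.flatMap_congr
  intro v _
  rw [PySem.Dict.getD_counter]
  simp

lemma A_eq_FB (a b : List Int) : moveToBack a b = FB a (b.foldl (bstep a) []) := by
  rw [← A_fold a b [] List.nodup_nil, FB_nil]
  rfl

-- ===== VERDICT (by name: the statement is the Claim_ definition above) =====
theorem moveToBack_spec : Claim_equal_moveToBack := by
  intro a b _
  unfold Spec_moveToBack
  rw [A_eq_FB, B_eq_FB]
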